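-- pv_equiv track=rewrite | github.com/abi2310/mnemos | backend/app/services/data_pipeline/pipeline_services/schema_check.py | _find_duplicate_columns
-- ===== SOURCE A (Python) =====
-- from typing import Any, Dict, List
--
-- def _find_duplicate_columns(columns: List[str]) -> List[str]:
--     # Return column names that appear more than once.
--     seen = set()
--     duplicates = []
--     for name in columns:
--         if name in seen:
--             duplicates.append(name)
--         else:
--             seen.add(name)
--     return sorted(set(duplicates))
-- ===== SOURCE B (Python) =====
-- def _find_duplicate_columns(columns):
--     # Sort-then-scan: after sorting, equal names are adjacent, so one run-length
--     # scan emits each name exactly when its run reaches length 2; the result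
--     # comes out already sorted, with no set or dict.
--     out = []
--     prev = None
--     count = 0
--     for name in sorted(columns):
--         if prev == name:
--             count += 1
--             if count == 2:
--                 out.append(name)
--         else:
--             prev = name
--             count = 1
--     return out
-- ===== Notes on version B (the rewrite author's own statement) =====
-- stated objective: alternative
-- what changed: Replaces the hash-based seen-set/duplicates-list scan followed by sorted(set(...)) with a sort-first algorithm: sort the names, then a single run-length scan over the sorted list appends each name exactly when its run of adjacent equal names reaches length 2, producing the sorted result directly with no set or dict.
import Mathlib
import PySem

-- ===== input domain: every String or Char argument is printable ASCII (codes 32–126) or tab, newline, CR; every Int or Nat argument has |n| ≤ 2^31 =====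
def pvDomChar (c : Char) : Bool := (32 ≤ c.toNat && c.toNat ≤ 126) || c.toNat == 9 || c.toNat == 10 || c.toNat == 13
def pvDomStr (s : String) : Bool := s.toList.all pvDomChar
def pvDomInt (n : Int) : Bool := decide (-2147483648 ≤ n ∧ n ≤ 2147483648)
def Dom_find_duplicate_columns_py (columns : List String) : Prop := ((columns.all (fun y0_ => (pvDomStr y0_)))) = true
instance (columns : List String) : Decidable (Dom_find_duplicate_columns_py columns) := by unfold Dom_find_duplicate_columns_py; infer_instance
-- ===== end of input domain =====

-- B replaces A's hash-based seen-set/duplicates-list scan + sorted(set(...)) by a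
-- sort-then-scan: sort the names, then recursively emit the head of each run of
-- adjacent equal names of length >= 2 (alternative algorithm; same cost).

-- ===== PORT A =====
-- seen-set / duplicates-list loop, then sorted(set(duplicates))
def find_duplicate_columns_py (columns : List String) : List String :=
  let st := columns.foldl
    (fun (st : PySem.Set String × List String) name =>
      if PySem.Set.contains st.1 name then (st.1, st.2 ++ [name])
      else (PySem.Set.add st.1 name, st.2))
    (PySem.Set.empty, [])
  PySem.List.sorted (PySem.Set.ofList st.2) (fun x => x) false

-- ===== PORT B =====
-- fold state (out, prev, count): run-length scan of the sorted list
def dupStep (st : List String × Option String × Int) (name : String) :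
    List String × Option String × Int :=
  if st.2.1 = some name then
    (if st.2.2 + 1 = 2 then st.1 ++ [name] else st.1, some name, st.2.2 + 1)
  else (st.1, some name, 1)

def find_duplicate_columns_py_alt (columns : List String) : List String :=
  ((PySem.List.sorted columns (fun x => x) false).foldl dupStep ([], none, 0)).1

-- ===== PRECONDITION & SPEC =====
def Spec_find_duplicate_columns_py (columns : List String) (out : List String) : Prop := out = find_duplicate_columns_py_alt columns
instance (columns : List String) (out : List String) : Decidable (Spec_find_duplicate_columns_py columns out) := by unfold Spec_find_duplicate_columns_py; infer_instance

-- ===== CLAIM (what is proved, stated in full; the proofs are below) =====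
def Claim_equal_find_duplicate_columns_py : Prop := ∀ (columns : List String), Dom_find_duplicate_columns_py columns → Spec_find_duplicate_columns_py columns (find_duplicate_columns_py columns)

-- ===== LEMMAS AND PROOFS =====

-- A's loop invariant: x ends up in the duplicates list iff it was already in
-- dups, or it is in the remaining input and either already seen or repeated there.
theorem a_loop_mem (cs : List String) (seen : PySem.Set String) (dups : List String)
    (x : String) :
    (x ∈ (cs.foldl
      (fun (st : PySem.Set String × List String) name =>
        if PySem.Set.contains st.1 name then (st.1, st.2 ++ [name])
        else (PySem.Set.add st.1 name, st.2)) (seen, dups)).2)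
      ↔ (x ∈ dups ∨ (PySem.Set.contains seen x ∧ x ∈ cs) ∨ 2 ≤ cs.count x) := by
  induction cs generalizing seen dups with
  | nil => simp
  | cons c cs ih =>
    simp only [List.foldl_cons]
    by_cases hc : PySem.Set.contains seen c
    · rw [if_pos hc, ih]
      by_cases hxc : x = c
      · subst hxc
        have hx : x ∈ seen := by simpa using hc
        simp [hx]
      · have hne : ¬ c = x := fun h => hxc h.symm
        simp only [List.mem_append, List.mem_cons, List.count_cons, hxc]
        rw [if_neg (by simpa using hne)]
        tauto
    · rw [if_neg hc, ih]
      by_cases hxc : x = c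
      · subst hxc
        have hadd : PySem.Set.contains (PySem.Set.add seen x) x = true := by
          simp [PySem.Set.mem_add]
        have hcf : PySem.Set.contains seen x = false := by
          simpa using hc
        simp only [hadd, hcf, true_and, Bool.false_eq_true, false_or,
          List.count_cons_self, List.mem_cons, true_or, and_true]
        by_cases hd : x ∈ dups
        · simp [hd]
        · simp only [hd, false_or]
          rw [← List.count_pos_iff]
          omega
      · have hadd : PySem.Set.contains (PySem.Set.add seen c) x
            = PySem.Set.contains seen x := by
          simp only [PySem.Set.contains_eq_listContains]
          simp [PySem.Set.add_eq_ite]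
          split <;> simp [hxc]
        have hne : ¬ c = x := fun h => hxc h.symm
        simp only [hadd, List.mem_cons, List.count_cons, hxc]
        rw [if_neg (by simpa using hne)]
        tauto

-- specialisation to A's initial state
theorem a_dups_mem (columns : List String) (x : String) :
    (x ∈ (columns.foldl
      (fun (st : PySem.Set String × List String) name =>
        if PySem.Set.contains st.1 name then (st.1, st.2 ++ [name])
        else (PySem.Set.add st.1 name, st.2)) (PySem.Set.empty, [])).2)
      ↔ 2 ≤ columns.count x := by
  rw [a_loop_mem]
  simp [PySem.Set.empty]

-- B's run-length scan over a (≤-)sorted suffix, started just after seeing `p`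
-- (c ≥ 1 occurrences so far): it appends exactly the names that reach a total
-- count of 2, in strictly increasing order.
theorem dup_fold (s : List String) (out : List String) (p : String) (c : Int)
    (hs : s.Pairwise (· ≤ ·)) (hp : ∀ y ∈ s, p ≤ y) (hc : 1 ≤ c) :
    ∃ Δ, (s.foldl dupStep (out, some p, c)).1 = out ++ Δ ∧
      Δ.Pairwise (· < ·) ∧ (∀ x ∈ Δ, p ≤ x) ∧
      (∀ x, x ∈ Δ ↔ ((x = p ∧ c = 1 ∧ p ∈ s) ∨ (x ≠ p ∧ 2 ≤ s.count x))) := by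
  induction s generalizing out p c with
  | nil => exact ⟨[], by simp, by simp, by simp, by simp⟩
  | cons a t ih =>
    have hs' : t.Pairwise (· ≤ ·) := (List.pairwise_cons.mp hs).2
    have hat : ∀ y ∈ t, a ≤ y := (List.pairwise_cons.mp hs).1
    by_cases hpa : p = a
    · subst hpa
      obtain ⟨Δ', h1, h2, h3, h4⟩ := ih (if c + 1 = 2 then out ++ [p] else out) p (c + 1)
        hs' hat (by omega)
      have hstep : List.foldl dupStep (out, some p, c) (p :: t)
          = List.foldl dupStep ((if c + 1 = 2 then out ++ [p] else out), some p, c + 1) t := by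
        simp [dupStep]
      have hΔ'mem : ∀ x, x ∈ Δ' ↔ (x ≠ p ∧ 2 ≤ t.count x) := by
        intro x
        rw [h4 x]
        constructor
        · rintro (⟨_, hc1, _⟩ | h)
          · omega
          · exact h
        · exact Or.inr
      by_cases hc1 : c = 1
      · refine ⟨p :: Δ', ?_, ?_, ?_, ?_⟩
        · rw [hstep, h1]; simp [hc1]
        · rw [List.pairwise_cons]
          refine ⟨fun x hx => ?_, h2⟩
          obtain ⟨hne, _⟩ := (hΔ'mem x).mp hx
          exact lt_of_le_of_ne (h3 x hx) (Ne.symm hne)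
        · intro x hx
          rcases List.mem_cons.mp hx with h | h
          · exact le_of_eq h.symm
          · exact h3 x h
        · intro x
          rw [List.mem_cons, hΔ'mem x]
          by_cases hxp : x = p
          · subst hxp; simp [hc1]
          · simp [hxp, Ne.symm hxp]
      · refine ⟨Δ', ?_, h2, ?_, ?_⟩
        · rw [hstep, h1]; simp [show ¬ c + 1 = 2 by omega]
        · exact h3
        · intro x
          rw [hΔ'mem x]
          by_cases hxp : x = p
          · subst hxp; simp [hc1]
          · simp [hxp, Ne.symm hxp]
    · have hpla : p < a := lt_of_le_of_ne (hp a (by simp)) hpa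
      have hpnot : p ∉ a :: t := by
        intro hmem
        rcases List.mem_cons.mp hmem with h | h
        · exact hpa h
        · exact absurd (hat p h) (not_le.mpr hpla)
      obtain ⟨Δ', h1, h2, h3, h4⟩ := ih out a 1 hs' hat le_rfl
      have hstep : List.foldl dupStep (out, some p, c) (a :: t)
          = List.foldl dupStep (out, some a, 1) t := by
        simp [dupStep, hpa]
      have hca : (a :: t).count a = t.count a + 1 := by simp
      have hcx : ∀ y, y ≠ a → (a :: t).count y = t.count y := by
        intro y hy
        simp [Ne.symm hy]
      refine ⟨Δ', by rw [hstep, h1], h2, ?_, ?_⟩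
      · exact fun x hx => le_of_lt (lt_of_lt_of_le hpla (h3 x hx))
      · intro x
        rw [h4 x]
        constructor
        · rintro (⟨hxa, _, hat'⟩ | ⟨hxa, hcnt⟩)
          · subst hxa
            have h1' : 0 < t.count x := List.count_pos_iff.mpr hat'
            exact Or.inr ⟨fun h => hpa h.symm, by rw [hca]; omega⟩
          · have hxp : x ≠ p := by
              intro h
              subst h
              have hxmem : x ∈ t := List.count_pos_iff.mp (by omega)
              exact absurd (hat x hxmem) (not_le.mpr hpla)
            exact Or.inr ⟨hxp, by rw [hcx x hxa]; omega⟩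
        · rintro (⟨hxp, _, hmem⟩ | ⟨hxp, hcnt⟩)
          · exact absurd (hxp ▸ hmem) hpnot
          · by_cases hxa : x = a
            · subst hxa
              rw [hca] at hcnt
              exact Or.inl ⟨by trivial, by trivial, List.count_pos_iff.mp (by omega)⟩
            · exact Or.inr ⟨hxa, by rw [hcx x hxa] at hcnt; exact hcnt⟩

theorem find_duplicate_columns_py_spec : Claim_equal_find_duplicate_columns_py := by
  intro columns _
  unfold Spec_find_duplicate_columns_py find_duplicate_columns_py find_duplicate_columns_py_alt
  simp only []
  have hsorted : (PySem.List.sorted columns (fun x => x) false).Pairwise (· ≤ ·) := by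
    simpa using PySem.List.sorted_pairwise columns (fun x => x)
  have hcount : ∀ x, (PySem.List.sorted columns (fun x => x) false).count x = columns.count x :=
    fun x => List.Perm.count_eq (PySem.List.sorted_perm columns (fun x => x) false) x
  -- characterise B's scan, splitting on the sorted list
  obtain ⟨Δ, hΔeq, hΔlt, hΔmem⟩ :
      ∃ Δ, ((PySem.List.sorted columns (fun x => x) false).foldl dupStep ([], none, 0)).1 = Δ ∧
        Δ.Pairwise (· < ·) ∧ (∀ x, x ∈ Δ ↔ 2 ≤ columns.count x) := by
    rcases hsl : PySem.List.sorted columns (fun x => x) false with _ | ⟨a, t⟩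
    · refine ⟨[], by simp, by simp, fun x => ?_⟩
      have := hcount x
      rw [hsl] at this
      simp only [List.count_nil] at this
      simp [← this]
    · rw [hsl] at hsorted hcount
      have hs' : t.Pairwise (· ≤ ·) := (List.pairwise_cons.mp hsorted).2
      have hat : ∀ y ∈ t, a ≤ y := (List.pairwise_cons.mp hsorted).1
      obtain ⟨Δ, h1, h2, h3, h4⟩ := dup_fold t [] a 1 hs' hat le_rfl
      have hstep : List.foldl dupStep (([] : List String), none, (0 : Int)) (a :: t)
          = List.foldl dupStep (([] : List String), some a, (1 : Int)) t := by
        simp [dupStep]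
      refine ⟨Δ, by rw [hstep, h1]; simp, h2, fun x => ?_⟩
      rw [h4 x, ← hcount x]
      by_cases hxa : x = a
      · subst hxa
        simp only [List.count_cons_self]
        constructor
        · rintro (⟨_, _, h⟩ | ⟨h, _⟩)
          · have : 1 ≤ t.count x := List.count_pos_iff.mpr h
            omega
          · exact absurd rfl h
        · intro h
          exact Or.inl ⟨by trivial, by trivial, List.count_pos_iff.mp (by omega)⟩
      · simp [hxa, Ne.symm hxa]
  rw [hΔeq]
  have hperm : Δ.Perm
      (PySem.Set.ofList (columns.foldl
        (fun (st : PySem.Set String × List String) name =>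
          if PySem.Set.contains st.1 name then (st.1, st.2 ++ [name])
          else (PySem.Set.add st.1 name, st.2)) (PySem.Set.empty, [])).2) := by
    rw [List.perm_ext_iff_of_nodup (List.Pairwise.imp ne_of_lt hΔlt) (PySem.Set.nodup_ofList _)]
    intro x
    rw [hΔmem x, PySem.Set.mem_ofList, a_dups_mem]
  exact PySem.List.sorted_eq_of_perm_of_pairwise_lt _ _ _ hperm hΔlt
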